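-- pv_equiv track=rewrite | github.com/Michael16b/Python_PrepaPTSI | exercice_divers.py | max_pentepos
-- ===== SOURCE A (Python) =====
-- def max_pentepos(L) :
--     if (len(L) < 1) :
--         return L
--     pentePos = [L[0]]
--     for i in range(1,len(L)):
--         if (L[i] > pentePos[-1]) :
--             pentePos.append(L[i])
--     return pentePos
-- ===== SOURCE B (Python) =====
-- def max_pentepos(L):
--     # Two-pass decomposition: build the running prefix-max table, then
--     # collapse consecutive equal values of it.
--     if len(L) < 1:
--         return L
--     r = []
--     m = L[0]
--     for x in L:
--         m = m if m >= x else x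
--         r.append(m)
--     out = [r[0]]
--     for prev, cur in zip(r, r[1:]):
--         if cur != prev:
--             out.append(cur)
--     return out
-- ===== Notes on version B (the rewrite author's own statement) =====
-- stated objective: alternative
-- what changed: Replaces A's single conditional-append loop (comparing each element to the last kept value) by a two-pass decomposition: first compute the running prefix-max table, then collapse consecutive equal entries of that table.
import Mathlib
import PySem

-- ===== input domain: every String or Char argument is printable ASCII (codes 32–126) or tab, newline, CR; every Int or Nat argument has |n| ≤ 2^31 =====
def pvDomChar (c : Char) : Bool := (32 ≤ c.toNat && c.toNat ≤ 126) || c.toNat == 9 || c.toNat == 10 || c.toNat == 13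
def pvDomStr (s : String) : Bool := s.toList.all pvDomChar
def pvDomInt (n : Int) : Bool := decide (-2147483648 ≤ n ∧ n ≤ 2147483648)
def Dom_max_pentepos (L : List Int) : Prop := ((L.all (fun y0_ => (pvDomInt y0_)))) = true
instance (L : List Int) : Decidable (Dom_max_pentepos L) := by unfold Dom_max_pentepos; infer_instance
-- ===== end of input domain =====

-- B differs from A by decomposition only: it first builds the running prefix-max
-- table and then collapses consecutive equal entries (objective: alternative).

-- ===== PORT A =====
-- single loop over indices 1..len-1, appending L[i] when it exceeds pentePos[-1]
def max_pentepos (L : List Int) : List Int :=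
  if L.length < 1 then L
  else
    (PySem.List.pyRange 1 (L.length : Int) 1).foldl
      (fun pentePos i =>
        if PySem.List.pyGetD L i 0 > PySem.List.pyGetD pentePos (-1) 0 then
          pentePos ++ [PySem.List.pyGetD L i 0]
        else pentePos)
      [PySem.List.pyGetD L 0 0]

-- ===== PORT B =====
-- first pass of Source B: r.append(m) with m the running max (m stays m on ties)
def pvPrefixMax (m : Int) : List Int → List Int
  | [] => []
  | x :: xs => (if m ≥ x then m else x) :: pvPrefixMax (if m ≥ x then m else x) xs

-- second pass of Source B: for (prev, cur) in zip(r, r[1:]): append cur if cur ≠ prev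
def pvCollapse (out : List Int) : List (Int × Int) → List Int
  | [] => out
  | (prev, cur) :: ps => pvCollapse (if cur ≠ prev then out ++ [cur] else out) ps

def max_pentepos_alt (L : List Int) : List Int :=
  if L.length < 1 then L
  else
    match L with
    | [] => L
    | a :: _ =>
      let r := pvPrefixMax a L
      pvCollapse [r.headD 0] (r.zip r.tail)

-- ===== PRECONDITION & SPEC =====
def Spec_max_pentepos (L : List Int) (out : List Int) : Prop := out = max_pentepos_alt L
instance (L : List Int) (out : List Int) : Decidable (Spec_max_pentepos L out) := by unfold Spec_max_pentepos; infer_instance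

-- ===== CLAIM (what is proved, stated in full; the proofs are below) =====
def Claim_equal_max_pentepos : Prop := ∀ (L : List Int), Dom_max_pentepos L → Spec_max_pentepos L (max_pentepos L)

-- ===== LEMMAS AND PROOFS =====

-- proof-only helper: the list of strict new maxima of xs beyond m
def pvAux (m : Int) : List Int → List Int
  | [] => []
  | x :: xs => if x > m then x :: pvAux x xs else pvAux m xs

lemma pvA_fold (xs : List Int) : ∀ (p : List Int) (m : Int),
    xs.foldl
      (fun acc x => if x > PySem.List.pyGetD acc (-1) 0 then acc ++ [x] else acc)
      (p ++ [m]) = p ++ m :: pvAux m xs := by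
  induction xs with
  | nil => intro p m; simp [pvAux]
  | cons x xs ih =>
    intro p m
    simp only [List.foldl_cons, PySem.List.pyGetD_neg_one_append_singleton, pvAux]
    by_cases h : x > m
    · rw [if_pos h, if_pos h, ih (p ++ [m]) x]
      simp
    · rw [if_neg h, if_neg h, ih p m]

lemma pvB_collapse (xs : List Int) : ∀ (m : Int) (out : List Int),
    pvCollapse out ((m :: pvPrefixMax m xs).zip (pvPrefixMax m xs))
      = out ++ pvAux m xs := by
  induction xs with
  | nil => intro m out; simp [pvPrefixMax, pvCollapse, pvAux]
  | cons x xs ih =>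
    intro m out
    by_cases h : x > m
    · have hm : ¬ (m ≥ x) := by omega
      simp only [pvPrefixMax, if_neg hm, pvAux, if_pos h, List.zip_cons_cons,
        pvCollapse]
      rw [if_pos (by omega : x ≠ m), ih x (out ++ [x])]
      simp
    · have hm : m ≥ x := by omega
      simp only [pvPrefixMax, if_pos hm, pvAux, if_neg h, List.zip_cons_cons,
        pvCollapse]
      rw [if_neg (by simp : ¬ m ≠ m), ih m out]

-- ===== VERDICT (by name: the statement is the Claim_ definition above) =====
theorem max_pentepos_spec : Claim_equal_max_pentepos := by
  unfold Claim_equal_max_pentepos Spec_max_pentepos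
  intro L _
  cases L with
  | nil => rfl
  | cons a xs =>
    show max_pentepos (a :: xs) = max_pentepos_alt (a :: xs)
    have hlen : ¬ ((a :: xs).length < 1) := by simp
    have hr : pvPrefixMax a (a :: xs) = a :: pvPrefixMax a xs := by
      simp [pvPrefixMax]
    unfold max_pentepos max_pentepos_alt
    rw [if_neg hlen, if_neg hlen]
    have hA : (PySem.List.pyRange 1 ((a :: xs).length : Int) 1).foldl
        (fun pentePos i =>
          if PySem.List.pyGetD (a :: xs) i 0 > PySem.List.pyGetD pentePos (-1) 0 then
            pentePos ++ [PySem.List.pyGetD (a :: xs) i 0]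
          else pentePos)
        [PySem.List.pyGetD (a :: xs) 0 0]
        = xs.foldl
            (fun acc x => if x > PySem.List.pyGetD acc (-1) 0 then acc ++ [x] else acc)
            ([] ++ [a]) := by
      rw [PySem.List.foldl_pyRange_pyGetD' (a :: xs) 0
        (fun acc x => if x > PySem.List.pyGetD acc (-1) 0 then acc ++ [x] else acc)
        [PySem.List.pyGetD (a :: xs) 0 0] (by omega)]
      simp [PySem.List.pyGetD_zero_cons]
    rw [hA, pvA_fold xs [] a]
    simp only [hr, List.tail_cons, List.headD_cons, List.nil_append]
    rw [pvB_collapse xs a [a]]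
    rfl
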